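-- pv_equiv track=rewrite | github.com/ZJU-DAILY/BIRDIE | tableid/emb.py | add_suffix_to_duplicates
-- ===== SOURCE A (Python) =====
-- def add_suffix_to_duplicates(string_list):
--     seen = {}
--     result = []
--     for string in string_list:
--         if string in seen:
--             seen[string] += 1
--             new_string = string + str(seen[string])
--             result.append(new_string)
--         else:
--             seen[string] = 0
--             result.append(string)
--     return result
-- ===== SOURCE B (Python) =====
-- def add_suffix_to_duplicates(string_list):
--     # Two passes: group the positions of each string, then fill a result
--     # array: first occurrence plain, j-th later occurrence gets str(j).
--     positions = {}
--     for i, s in enumerate(string_list):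
--         positions.setdefault(s, []).append(i)
--     result = [None] * len(string_list)
--     for s, idxs in positions.items():
--         for j, i in enumerate(idxs):
--             result[i] = s if j == 0 else s + str(j)
--     return result
-- ===== Notes on version B (the rewrite author's own statement) =====
-- stated objective: alternative
-- what changed: Replaces the single counter-dict loop with two passes: first group the positions of each string in a dict, then fill a result array writing the string plain at its first position and string+str(j) at its j-th later position.
import Mathlib
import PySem

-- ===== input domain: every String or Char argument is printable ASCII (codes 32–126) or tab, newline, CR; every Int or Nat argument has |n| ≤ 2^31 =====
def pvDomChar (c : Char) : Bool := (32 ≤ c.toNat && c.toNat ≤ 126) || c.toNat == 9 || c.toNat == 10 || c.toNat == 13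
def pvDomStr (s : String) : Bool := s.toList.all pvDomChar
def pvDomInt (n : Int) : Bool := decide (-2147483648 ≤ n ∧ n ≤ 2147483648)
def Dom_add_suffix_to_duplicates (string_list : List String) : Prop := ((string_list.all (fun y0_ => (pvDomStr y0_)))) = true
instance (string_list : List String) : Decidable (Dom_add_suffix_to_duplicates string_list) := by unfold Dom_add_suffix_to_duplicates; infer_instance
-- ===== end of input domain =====

-- B groups the positions of each string in one pass, then fills a result array (first
-- occurrence plain, j-th later occurrence suffixed), instead of A's counter-dict loop.

-- ===== PORT A =====
-- the for-loop of A, state = (seen, result), one step per list element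
def pvGoA (seen : PySem.Dict String Int) (result : List String) : List String → List String
  | [] => result
  | s :: rest =>
    if seen.contains s then
      let seen' := seen.insert s (seen.getD s 0 + 1)
      pvGoA seen' (result ++ [s ++ PySem.Int.toStr (seen'.getD s 0)]) rest
    else
      pvGoA (seen.insert s 0) (result ++ [s]) rest

def add_suffix_to_duplicates (string_list : List String) : List String :=
  pvGoA PySem.Dict.empty [] string_list

-- ===== PORT B =====
-- positions.setdefault(s, []).append(i) is Dict.modify with default [];
-- result[i] = … is List.set (i is an enumerate index, hence 0 ≤ i, so .toNat is exact);
-- [None] * n is a placeholder list (every slot is overwritten): replicate n "".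
def add_suffix_to_duplicates_alt (string_list : List String) : List String :=
  let positions : PySem.Dict String (List Int) :=
    (PySem.List.enumerate string_list).foldl
      (fun d p => d.modify p.2 [] (· ++ [p.1])) PySem.Dict.empty
  positions.items.foldl
    (fun r g =>
      (PySem.List.enumerate g.2).foldl
        (fun r p => r.set p.2.toNat (if p.1 = 0 then g.1 else g.1 ++ PySem.Int.toStr p.1)) r)
    (List.replicate string_list.length "")

-- ===== PRECONDITION & SPEC =====
def Spec_add_suffix_to_duplicates (string_list : List String) (out : List String) : Prop := out = add_suffix_to_duplicates_alt string_list
instance (string_list : List String) (out : List String) : Decidable (Spec_add_suffix_to_duplicates string_list out) := by unfold Spec_add_suffix_to_duplicates; infer_instance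

-- ===== CLAIM (what is proved, stated in full; the proofs are below) =====
def Claim_equal_add_suffix_to_duplicates : Prop := ∀ (string_list : List String), Dom_add_suffix_to_duplicates string_list → Spec_add_suffix_to_duplicates string_list (add_suffix_to_duplicates string_list)

-- ===== LEMMAS AND PROOFS =====

-- canonical value: element for s after prefix `pre` is s, or s ++ str(count of s in pre)
def pvCanon (pre : List String) : List String → List String
  | [] => []
  | s :: rest =>
    (if pre.count s = 0 then s else s ++ PySem.Int.toStr (pre.count s : Int)) :: pvCanon (pre ++ [s]) rest

-- the label both programs attach to an occurrence with j earlier equal strings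
def pvLbl (s : String) (j : Int) : String := if j = 0 then s else s ++ PySem.Int.toStr j

-- positions (as Ints) of the occurrences of s in a list, offset by c
def pvOcc (s : String) : List String → Int → List Int
  | [], _ => []
  | x :: t, c => if x = s then c :: pvOcc s t (c + 1) else pvOcc s t (c + 1)

lemma pvGoA_eq_canon (rest : List String) : ∀ (pre : List String) (seen : PySem.Dict String Int)
    (result : List String),
    (∀ s, seen.get? s = if pre.count s = 0 then none else some ((pre.count s : Int) - 1)) →
    pvGoA seen result rest = result ++ pvCanon pre rest := by
  induction rest with
  | nil => intro pre seen result _; simp [pvGoA, pvCanon]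
  | cons s rest ih =>
    intro pre seen result hinv
    have hc := hinv s
    by_cases h0 : pre.count s = 0
    · have hnone : seen.get? s = none := by rw [hc]; simp [h0]
      have hcon : seen.contains s = false := by
        rw [PySem.Dict.contains_eq_isSome_get?, hnone]; rfl
      rw [pvGoA, hcon]
      simp only [Bool.false_eq_true, if_false]
      rw [ih (pre ++ [s]) _ _ ?_]
      · simp [pvCanon, h0]
      · intro t
        by_cases hts : t = s
        · subst hts
          rw [PySem.Dict.get?_insert_self]
          simp [List.count_append, h0]
        · rw [PySem.Dict.get?_insert_of_ne _ _ hts, hinv t]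
          have : (pre ++ [s]).count t = pre.count t := by
            simp [List.count_append, List.count_singleton]
            intro h; exact absurd h.symm hts
          rw [this]
    · have hsome : seen.get? s = some ((pre.count s : Int) - 1) := by rw [hc]; simp [h0]
      have hcon : seen.contains s = true := by
        rw [PySem.Dict.contains_eq_isSome_get?, hsome]; rfl
      rw [pvGoA, hcon]
      simp only [if_true]
      have hgd : seen.getD s 0 = (pre.count s : Int) - 1 :=
        PySem.Dict.getD_of_get?_eq_some seen 0 hsome
      have hgd' : (seen.insert s (seen.getD s 0 + 1)).getD s 0 = (pre.count s : Int) := by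
        rw [PySem.Dict.getD_of_get?_eq_some _ 0 (PySem.Dict.get?_insert_self _ _ _), hgd]; ring
      rw [hgd', ih (pre ++ [s]) _ _ ?_]
      · simp [pvCanon, h0]
      · intro t
        by_cases hts : t = s
        · subst hts
          rw [PySem.Dict.get?_insert_self, hgd]
          have : (pre ++ [t]).count t = pre.count t + 1 := by
            simp [List.count_append]
          rw [this]
          simp only [if_neg (by omega : ¬ pre.count t + 1 = 0)]
          push_cast; ring_nf
        · rw [PySem.Dict.get?_insert_of_ne _ _ hts, hinv t]
          have : (pre ++ [s]).count t = pre.count t := by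
            simp [List.count_append, List.count_singleton]
            intro h; exact absurd h.symm hts
          rw [this]

lemma pvCanon_length (l : List String) : ∀ pre, (pvCanon pre l).length = l.length := by
  induction l with
  | nil => intro pre; simp [pvCanon]
  | cons s t ih => intro pre; simp [pvCanon, ih]

lemma pvCanon_getElem? (l : List String) : ∀ (pre : List String) (k : Nat) (hk : k < l.length),
    (pvCanon pre l)[k]? = some (pvLbl (l[k]) (((pre ++ l.take k).count (l[k]) : Int))) := by
  induction l with
  | nil => intro _ k hk; simp at hk
  | cons s t ih =>
    intro pre k hk
    match k with
    | 0 =>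
      simp only [pvCanon, List.getElem?_cons_zero, List.getElem_cons_zero, List.take_zero,
        List.append_nil, pvLbl]
      by_cases h0 : pre.count s = 0 <;> simp [h0]
    | k + 1 =>
      simp only [pvCanon, List.getElem?_cons_succ, List.getElem_cons_succ, List.take_succ_cons]
      rw [ih (pre ++ [s]) k (by simpa using hk)]
      simp

-- the filtered enumerate underlying the positions dict is exactly pvOcc
lemma pvOcc_eq_filter (s : String) (l : List String) : ∀ c : Int,
    (((PySem.List.enumerate l c).map Prod.swap).filter (fun p => p.1 == s)).map (·.2)
      = pvOcc s l c := by
  induction l with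
  | nil => intro c; simp [PySem.List.enumerate_nil, pvOcc]
  | cons x t ih =>
    intro c
    rw [PySem.List.enumerate_cons]
    by_cases hxs : x = s
    · subst hxs
      simp only [List.map_cons, Prod.swap_prod_mk, List.filter_cons, beq_self_eq_true,
        if_true, List.map_cons, pvOcc, if_true]
      rw [ih (c + 1)]
    · simp only [List.map_cons, Prod.swap_prod_mk, List.filter_cons, pvOcc, if_neg hxs]
      rw [if_neg (by simpa using hxs), ih (c + 1)]

lemma pvPositions_getD (l : List String) (s : String) :
    ((PySem.List.enumerate l).foldl (fun d p => d.modify p.2 [] (· ++ [p.1]))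
        PySem.Dict.empty).getD s []
      = pvOcc s l 0 := by
  have hfold : (PySem.List.enumerate l).foldl (fun d p => d.modify p.2 [] (· ++ [p.1]))
        (PySem.Dict.empty : PySem.Dict String (List Int))
      = ((PySem.List.enumerate l).map Prod.swap).foldl
          (fun d p => d.modify p.1 [] (· ++ [p.2])) PySem.Dict.empty := by
    rw [List.foldl_map]
    simp
  rw [hfold, PySem.Dict.getD_foldl_modify_append, PySem.Dict.getD_empty, List.nil_append,
    pvOcc_eq_filter]

lemma pvPositions_items (l : List String) :
    ((PySem.List.enumerate l).foldl (fun d p => d.modify p.2 [] (· ++ [p.1]))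
        (PySem.Dict.empty : PySem.Dict String (List Int))).items
      = (PySem.List.dedup l).map (fun s => (s, pvOcc s l 0)) := by
  have hnd : ((PySem.List.enumerate l).foldl (fun d p => d.modify p.2 [] (· ++ [p.1]))
      (PySem.Dict.empty : PySem.Dict String (List Int))).keys.Nodup := by
    exact PySem.Dict.nodup_keys_foldl_modify_key (PySem.List.enumerate l) (fun p => p.2) []
      (fun _ p => (· ++ [p.1])) PySem.Dict.empty (by simp [PySem.Dict.keys_empty])
  rw [PySem.Dict.items_eq_map_keys _ hnd []]
  have hkeys : ((PySem.List.enumerate l).foldl (fun d p => d.modify p.2 [] (· ++ [p.1]))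
      (PySem.Dict.empty : PySem.Dict String (List Int))).keys = PySem.List.dedup l := by
    have := PySem.Dict.keys_foldl_modify_key (PySem.List.enumerate l) (fun p => p.2) []
      (fun _ p => (· ++ [p.1])) (PySem.Dict.empty : PySem.Dict String (List Int))
    rw [this, PySem.Dict.keys_empty, PySem.Set.update_nil_left, PySem.List.map_snd_enumerate,
      PySem.List.dedup_eq_ofList]
  rw [hkeys]
  exact List.map_congr_left (fun s _ => by rw [pvPositions_getD])

lemma pvInner_length (s : String) (ps : List (Int × Int)) : ∀ (r : List String),
    (ps.foldl (fun r p => r.set p.2.toNat (if p.1 = 0 then s else s ++ PySem.Int.toStr p.1)) r).length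
      = r.length := by
  induction ps with
  | nil => intro r; rfl
  | cons p t ih => intro r; rw [List.foldl_cons, ih]; simp

lemma pvInner (s : String) (t : List String) : ∀ (c : Nat) (j : Int) (r : List String),
    c + t.length ≤ r.length →
    ∀ (k : Nat),
    ((PySem.List.enumerate (pvOcc s t (c : Int)) j).foldl
        (fun r p => r.set p.2.toNat (if p.1 = 0 then s else s ++ PySem.Int.toStr p.1)) r)[k]?
      = if c ≤ k ∧ t[k - c]? = some s
        then some (pvLbl s (j + ((t.take (k - c)).count s : Int)))
        else r[k]? := by
  induction t with
  | nil => intro c j r _ k; simp [pvOcc, PySem.List.enumerate_nil]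
  | cons x t ih =>
    intro c j r hlen k
    have hlen' : c + t.length + 1 ≤ r.length := by simp at hlen; omega
    have hc1 : ((c : Int) + 1) = ((c + 1 : Nat) : Int) := by push_cast; ring
    by_cases hxs : x = s
    · subst hxs
      rw [show pvOcc x (x :: t) (c : Int) = (c : Int) :: pvOcc x t ((c : Int) + 1) by
        simp [pvOcc]]
      rw [PySem.List.enumerate_cons, List.foldl_cons]
      simp only [Int.toNat_natCast]
      rw [hc1, ih (c + 1) (j + 1) _ (by simp only [List.length_set]; omega) k]
      rcases lt_trichotomy k c with hk | hk | hk
      · have h2 : ¬ (c + 1 ≤ k ∧ t[k - (c + 1)]? = some x) := by rintro ⟨h, -⟩; omega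
        have h3 : ¬ (c ≤ k ∧ (x :: t)[k - c]? = some x) := by rintro ⟨h, -⟩; omega
        rw [if_neg h2, if_neg h3, List.getElem?_set, if_neg (show ¬ c = k by omega)]
      · subst hk
        have h2 : ¬ (k + 1 ≤ k ∧ t[k - (k + 1)]? = some x) := by rintro ⟨h, -⟩; omega
        have h3 : k ≤ k ∧ (x :: t)[k - k]? = some x := ⟨le_refl k, by simp⟩
        rw [if_neg h2, if_pos h3]
        simp only [Nat.sub_self, List.take_zero, List.count_nil, Nat.cast_zero, add_zero]
        rw [List.getElem?_set, if_pos rfl, if_pos (show k < r.length by omega)]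
        rfl
      · have hxx : (x :: t)[k - c]? = t[k - (c + 1)]? := by
          rw [show k - c = (k - (c + 1)) + 1 by omega]; simp
        have htake : (x :: t).take (k - c) = x :: t.take (k - (c + 1)) := by
          rw [show k - c = (k - (c + 1)) + 1 by omega]; simp
        by_cases hmem : t[k - (c + 1)]? = some x
        · have h2 : c + 1 ≤ k ∧ t[k - (c + 1)]? = some x := ⟨by omega, hmem⟩
          have h3 : c ≤ k ∧ (x :: t)[k - c]? = some x := ⟨by omega, by rw [hxx]; exact hmem⟩
          rw [if_pos h2, if_pos h3, htake, List.count_cons_self]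
          push_cast; ring_nf
        · have h2 : ¬ (c + 1 ≤ k ∧ t[k - (c + 1)]? = some x) := by rintro ⟨-, hm⟩; exact hmem hm
          have h3 : ¬ (c ≤ k ∧ (x :: t)[k - c]? = some x) := by
            rintro ⟨-, hm⟩; rw [hxx] at hm; exact hmem hm
          rw [if_neg h2, if_neg h3, List.getElem?_set, if_neg (show ¬ c = k by omega)]
    · rw [show pvOcc s (x :: t) (c : Int) = pvOcc s t ((c : Int) + 1) by
        simp [pvOcc, hxs]]
      rw [hc1, ih (c + 1) j r (by omega) k]
      rcases lt_trichotomy k c with hk | hk | hk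
      · have h2 : ¬ (c + 1 ≤ k ∧ t[k - (c + 1)]? = some s) := by rintro ⟨h, -⟩; omega
        have h3 : ¬ (c ≤ k ∧ (x :: t)[k - c]? = some s) := by rintro ⟨h, -⟩; omega
        rw [if_neg h2, if_neg h3]
      · subst hk
        have h2 : ¬ (k + 1 ≤ k ∧ t[k - (k + 1)]? = some s) := by rintro ⟨h, -⟩; omega
        have h3 : ¬ (k ≤ k ∧ (x :: t)[k - k]? = some s) := by
          rintro ⟨-, hm⟩; simp at hm; exact hxs hm
        rw [if_neg h2, if_neg h3]
      · have hxx : (x :: t)[k - c]? = t[k - (c + 1)]? := by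
          rw [show k - c = (k - (c + 1)) + 1 by omega]; simp
        have htake : (x :: t).take (k - c) = x :: t.take (k - (c + 1)) := by
          rw [show k - c = (k - (c + 1)) + 1 by omega]; simp
        by_cases hmem : t[k - (c + 1)]? = some s
        · have h2 : c + 1 ≤ k ∧ t[k - (c + 1)]? = some s := ⟨by omega, hmem⟩
          have h3 : c ≤ k ∧ (x :: t)[k - c]? = some s := ⟨by omega, by rw [hxx]; exact hmem⟩
          rw [if_pos h2, if_pos h3, htake, List.count_cons_of_ne hxs]
        · have h2 : ¬ (c + 1 ≤ k ∧ t[k - (c + 1)]? = some s) := by rintro ⟨-, hm⟩; exact hmem hm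
          have h3 : ¬ (c ≤ k ∧ (x :: t)[k - c]? = some s) := by
            rintro ⟨-, hm⟩; rw [hxx] at hm; exact hmem hm
          rw [if_neg h2, if_neg h3]

lemma pvOuter_length (gs : List (String × List Int)) : ∀ (r : List String),
    (gs.foldl (fun r g => (PySem.List.enumerate g.2).foldl
        (fun r p => r.set p.2.toNat (if p.1 = 0 then g.1 else g.1 ++ PySem.Int.toStr p.1)) r)
      r).length = r.length := by
  induction gs with
  | nil => intro r; rfl
  | cons g t ih => intro r; rw [List.foldl_cons, ih, pvInner_length]

lemma pvOuter (l : List String) : ∀ (S : List String) (r : List String), r.length = l.length →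
    ∀ (k : Nat) (hk : k < l.length),
    ((S.map (fun s => (s, pvOcc s l 0))).foldl
        (fun r g => (PySem.List.enumerate g.2).foldl
          (fun r p => r.set p.2.toNat (if p.1 = 0 then g.1 else g.1 ++ PySem.Int.toStr p.1)) r)
        r)[k]?
      = if l[k] ∈ S then some (pvLbl (l[k]) (((l.take k).count (l[k]) : Int))) else r[k]? := by
  intro S
  induction S with
  | nil => intro r _ k hk; simp
  | cons s S ih =>
    intro r hlen k hk
    simp only [List.map_cons, List.foldl_cons]
    rw [ih _ (by rw [pvInner_length]; exact hlen) k hk]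
    have hinner := pvInner s l 0 0 r (by omega) k
    simp only [Nat.cast_zero, Nat.sub_zero, zero_add] at hinner
    by_cases hS : l[k] ∈ S
    · rw [if_pos hS, if_pos (List.mem_cons_of_mem _ hS)]
    · rw [if_neg hS, hinner]
      by_cases hs : l[k] = s
      · have hcond : 0 ≤ k ∧ l[k]? = some s :=
          ⟨Nat.zero_le k, by rw [List.getElem?_eq_getElem hk, hs]⟩
        rw [if_pos hcond, if_pos (show l[k] ∈ s :: S by simp [hs]), hs]
      · have hcond : ¬ (0 ≤ k ∧ l[k]? = some s) := by
          rintro ⟨-, hm⟩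
          rw [List.getElem?_eq_getElem hk] at hm
          exact hs (by simpa using hm)
        rw [if_neg hcond, if_neg (show l[k] ∉ s :: S by simp [hs, hS])]

lemma pvAlt_eq_canon (l : List String) :
    add_suffix_to_duplicates_alt l = pvCanon [] l := by
  unfold add_suffix_to_duplicates_alt
  dsimp only
  rw [pvPositions_items]
  apply List.ext_getElem?
  intro k
  by_cases hk : k < l.length
  · rw [pvOuter l (PySem.List.dedup l) _ (by simp) k hk,
      if_pos (by rw [PySem.List.mem_dedup]; exact List.getElem_mem hk),
      pvCanon_getElem? l [] k hk]
    simp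
  · rw [List.getElem?_eq_none (by rw [pvOuter_length]; simpa using not_lt.mp hk),
      List.getElem?_eq_none (by rw [pvCanon_length]; exact not_lt.mp hk)]

-- ===== VERDICT (by name: the statement is the Claim_ definition above) =====
theorem add_suffix_to_duplicates_spec : Claim_equal_add_suffix_to_duplicates := by
  intro l _
  unfold Spec_add_suffix_to_duplicates add_suffix_to_duplicates
  rw [pvAlt_eq_canon,
    pvGoA_eq_canon l [] PySem.Dict.empty [] (by intro s; simp [PySem.Dict.get?_empty]),
    List.nil_append]
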